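-- pv_equiv track=rewrite | github.com/BioKT/MartiniSurf | martinisurf/gromacs_inputs.py | _append_itp_entries
-- ===== SOURCE A (Python) =====
-- def _append_itp_entries(lines: list[str], section: str, entries: list[str]) -> list[str]:
--     if not entries:
--         return lines
--
--     target = section.lower()
--     start = -1
--     for i, raw in enumerate(lines):
--         stripped = raw.strip().lower()
--         if stripped.startswith("[") and stripped.endswith("]"):
--             if stripped[1:-1].strip() == target:
--                 start = i
--                 break
--
--     if start < 0:
--         out = list(lines)
--         if out and out[-1].strip():
--             out.append("")
--         out.append(f"[ {section} ]")
--         out.extend(entries)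
--         return out
--
--     end = len(lines)
--     for j in range(start + 1, len(lines)):
--         stripped = lines[j].strip()
--         if stripped.startswith("[") and stripped.endswith("]"):
--             end = j
--             break
--
--     return lines[:end] + entries + lines[end:]
-- ===== SOURCE B (Python) =====
-- def _append_itp_entries(lines: list[str], section: str, entries: list[str]) -> list[str]:
--     if not entries:
--         return lines
--
--     def is_header(raw):
--         st = raw.strip()
--         return st.startswith("[") and st.endswith("]")
--
--     # Parse the file into header-delimited blocks: a preamble block, then one
--     # block per bracket-header line (the header plus its body lines).
--     blocks = [[]]
--     for raw in lines:
--         if is_header(raw):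
--             blocks.append([raw])
--         else:
--             blocks[-1].append(raw)
--
--     # Re-emit the blocks, appending the entries to the end of the first block
--     # whose header names the target section.
--     target = section.lower()
--     out = []
--     done = False
--     for b in blocks:
--         if (not done and b and is_header(b[0])
--                 and b[0].strip().lower()[1:-1].strip() == target):
--             out.extend(b)
--             out.extend(entries)
--             done = True
--         else:
--             out.extend(b)
--
--     if done:
--         return out
--
--     # No such section: start a new one at the end.
--     if out and out[-1].strip():
--         out.append("")
--     out.append(f"[ {section} ]")
--     out.extend(entries)
--     return out
-- ===== Notes on version B (the rewrite author's own statement) =====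
-- stated objective: alternative
-- what changed: Instead of locating index bounds and splicing with slices, B parses the lines into header-delimited blocks (a preamble block plus one block per bracket-header line) and re-emits the blocks, appending the entries to the first block whose header names the target section; no index arithmetic or slicing is used.
import Mathlib
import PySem

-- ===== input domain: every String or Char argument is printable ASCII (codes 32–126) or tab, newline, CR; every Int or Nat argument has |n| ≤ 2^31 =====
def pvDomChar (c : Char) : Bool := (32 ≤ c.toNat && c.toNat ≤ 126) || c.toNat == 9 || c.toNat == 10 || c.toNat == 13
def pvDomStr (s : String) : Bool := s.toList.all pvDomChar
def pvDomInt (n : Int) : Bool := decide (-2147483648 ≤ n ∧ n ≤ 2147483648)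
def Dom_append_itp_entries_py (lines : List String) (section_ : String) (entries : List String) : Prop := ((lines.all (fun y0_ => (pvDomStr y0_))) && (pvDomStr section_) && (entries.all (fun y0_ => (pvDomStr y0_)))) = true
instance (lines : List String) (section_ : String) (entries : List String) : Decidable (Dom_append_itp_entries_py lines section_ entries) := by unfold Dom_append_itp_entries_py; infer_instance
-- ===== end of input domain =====

-- B parses the lines into header-delimited blocks and re-emits them, appending the
-- entries to the first block whose header names the section (objective: alternative).


-- ===== PORT A =====
-- A's first loop: scan enumerate(lines), break at the named section header, sentinel -1
def pvAFindStart (pairs : List (Int × String)) (target : String) : Int :=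
  match pairs with
  | [] => -1
  | (i, raw) :: rest =>
    let stripped := PySem.Str.lower (PySem.Str.strip raw)
    if PySem.Str.startswith stripped "[" && PySem.Str.endswith stripped "]" &&
       (PySem.Str.strip (PySem.Str.slice stripped (some 1) (some (-1))) == target)
    then i else pvAFindStart rest target

-- A's second loop: for j in range(start+1, len(lines)), break at the first bracket line
def pvAFindEnd (js : List Int) (lines : List String) (endv : Int) : Int :=
  match js with
  | [] => endv
  | j :: rest =>
    -- j is always in range when called (range(start+1, len(lines))), so getD "" is exact
    let stripped := PySem.Str.strip ((PySem.List.pyGet? lines j).getD "")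
    if PySem.Str.startswith stripped "[" && PySem.Str.endswith stripped "]" then j
    else pvAFindEnd rest lines endv

def append_itp_entries_py (lines : List String) (section_ : String) (entries : List String) : List String :=
  if entries.isEmpty then lines
  else
    let target := PySem.Str.lower section_
    let start := pvAFindStart (PySem.List.enumerate lines 0) target
    if start < 0 then
      let out := lines
      let out := if !out.isEmpty && !(PySem.Str.strip ((PySem.List.pyGet? out (-1)).getD "") == "") then out ++ [""] else out
      let out := out ++ ["[ " ++ section_ ++ " ]"]
      out ++ entries
    else
      let endv := pvAFindEnd (PySem.List.pyRange (start + 1) (lines.length : Int) 1) lines (lines.length : Int)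
      PySem.List.slice lines none (some endv) ++ entries ++ PySem.List.slice lines (some endv) none

-- ===== PORT B =====
-- B's is_header helper
def pvIsHeaderLn (raw : String) : Bool :=
  let st := PySem.Str.strip raw
  PySem.Str.startswith st "[" && PySem.Str.endswith st "]"

-- B's first loop body: start a new block at a header line, else extend the last block
def pvBStep (blocks : List (List String)) (raw : String) : List (List String) :=
  if pvIsHeaderLn raw then blocks ++ [[raw]]
  else blocks.dropLast ++ [(blocks.getLast?.getD []) ++ [raw]]

def pvSplitBlocks (lines : List String) : List (List String) :=
  lines.foldl pvBStep [[]]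

-- B's matching test on a block: non-empty, header head, and its name is the target
def pvBMatch (target : String) (b : List String) : Bool :=
  !b.isEmpty && pvIsHeaderLn (b.headD "") &&
  (PySem.Str.strip (PySem.Str.slice (PySem.Str.lower (PySem.Str.strip (b.headD ""))) (some 1) (some (-1))) == target)

-- B's second loop body: emit the block, inserting the entries after the first match
def pvEStep (target : String) (entries : List String) (acc : List String × Bool) (b : List String) : List String × Bool :=
  if !acc.2 && pvBMatch target b then (acc.1 ++ b ++ entries, true)
  else (acc.1 ++ b, acc.2)

def append_itp_entries_py_alt (lines : List String) (section_ : String) (entries : List String) : List String :=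
  if entries.isEmpty then lines
  else
    let blocks := pvSplitBlocks lines
    let target := PySem.Str.lower section_
    let od := blocks.foldl (pvEStep target entries) ([], false)
    if od.2 then od.1
    else
      let out := od.1
      let out := if !out.isEmpty && !(PySem.Str.strip ((PySem.List.pyGet? out (-1)).getD "") == "") then out ++ [""] else out
      let out := out ++ ["[ " ++ section_ ++ " ]"]
      out ++ entries

-- ===== PRECONDITION & SPEC =====
def Spec_append_itp_entries_py (lines : List String) (section_ : String) (entries : List String) (out : List String) : Prop := out = append_itp_entries_py_alt lines section_ entries
instance (lines : List String) (section_ : String) (entries : List String) (out : List String) : Decidable (Spec_append_itp_entries_py lines section_ entries out) := by unfold Spec_append_itp_entries_py; infer_instance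

-- ===== CLAIM (what is proved, stated in full; the proofs are below) =====
def Claim_equal_append_itp_entries_py : Prop := ∀ (lines : List String) (section_ : String) (entries : List String), Dom_append_itp_entries_py lines section_ entries → Spec_append_itp_entries_py lines section_ entries (append_itp_entries_py lines section_ entries)

-- ===== LEMMAS AND PROOFS =====

-- the bracket predicate on an (already stripped, possibly lowered) line
def pvIsB (s : String) : Bool := PySem.Str.startswith s "[" && PySem.Str.endswith s "]"

-- the common matching predicate on a raw line
def pvMatchLn (target : String) (x : String) : Bool :=
  pvIsHeaderLn x &&
  (PySem.Str.strip (PySem.Str.slice (PySem.Str.lower (PySem.Str.strip x)) (some 1) (some (-1))) == target)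

theorem pv_lowerChar_fix (c d : Char) (hd1 : 91 ≤ d.toNat) (hd2 : d.toNat ≤ 96) :
    (PySem.Chars.lowerChar c = d) ↔ c = d := by
  unfold PySem.Chars.lowerChar PySem.Chars.isupper
  split
  · rename_i hu
    simp only [Bool.and_eq_true, decide_eq_true_eq] at hu
    have h1 : 65 ≤ c.toNat := by
      have := hu.1; rw [Char.le_def] at this; exact UInt32.le_iff_toNat_le.mp this
    have h2 : c.toNat ≤ 90 := by
      have := hu.2; rw [Char.le_def] at this; exact UInt32.le_iff_toNat_le.mp this
    constructor
    · intro h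
      exfalso
      have h3 := congrArg Char.toNat h
      rw [Char.toNat_ofNat] at h3
      have hv : (c.toNat + 32).isValidChar := Or.inl (by omega)
      simp [hv] at h3
      omega
    · intro h
      exfalso
      have := h ▸ hd1
      omega
  · exact Iff.rfl

theorem pv_isPrefix_single_lower (d : Char) (hd1 : 91 ≤ d.toNat) (hd2 : d.toNat ≤ 96)
    (l : List Char) : [d].isPrefixOf (l.map PySem.Chars.lowerChar) = [d].isPrefixOf l := by
  cases l with
  | nil => rfl
  | cons c cs =>
    simp only [List.map_cons, List.isPrefixOf, Bool.and_true]
    rw [Bool.eq_iff_iff]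
    simp only [beq_iff_eq]
    constructor
    · intro h; exact ((pv_lowerChar_fix c d hd1 hd2).mp h.symm).symm
    · intro h; exact ((pv_lowerChar_fix c d hd1 hd2).mpr h.symm).symm

theorem pv_isB_lower (s : String) : pvIsB (PySem.Str.lower s) = pvIsB s := by
  unfold pvIsB
  simp only [PySem.Str.startswith_eq, PySem.Str.endswith_eq, PySem.Str.toList_lower]
  congr 1
  · show PySem.Chars.startswith (PySem.Chars.lower s.toList) "[".toList
        = PySem.Chars.startswith s.toList "[".toList
    unfold PySem.Chars.startswith PySem.Chars.lower
    rw [show "[".toList = ['['] from rfl]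
    exact pv_isPrefix_single_lower '[' (by decide) (by decide) s.toList
  · show PySem.Chars.endswith (PySem.Chars.lower s.toList) "]".toList
        = PySem.Chars.endswith s.toList "]".toList
    unfold PySem.Chars.endswith PySem.Chars.lower
    rw [show "]".toList = [']'] from rfl]
    show ([']'].reverse).isPrefixOf (s.toList.map PySem.Chars.lowerChar).reverse
        = ([']'].reverse).isPrefixOf s.toList.reverse
    rw [← List.map_reverse, List.reverse_singleton]
    exact pv_isPrefix_single_lower ']' (by decide) (by decide) s.toList.reverse

-- A's loop condition on a line equals the common matching predicate
theorem pvACond_eq (x target : String) :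
    (PySem.Str.startswith (PySem.Str.lower (PySem.Str.strip x)) "[" &&
     PySem.Str.endswith (PySem.Str.lower (PySem.Str.strip x)) "]" &&
     (PySem.Str.strip (PySem.Str.slice (PySem.Str.lower (PySem.Str.strip x)) (some 1) (some (-1))) == target))
    = pvMatchLn target x := by
  have h := pv_isB_lower (PySem.Str.strip x)
  unfold pvIsB at h
  unfold pvMatchLn pvIsHeaderLn
  rw [h]

-- the common reference recursion: insert the entries after the body of the first matching header
def pvRun (target : String) (entries : List String) : List String → Option (List String)
  | [] => none
  | x :: xs =>
    if pvMatchLn target x then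
      some (x :: (xs.takeWhile (fun y => !pvIsHeaderLn y) ++ entries ++ xs.dropWhile (fun y => !pvIsHeaderLn y)))
    else (pvRun target entries xs).map (x :: ·)

-- equation lemmas for the ports' loop bodies (definitional; keep foldl's function folded)
theorem pvRun_cons (t : String) (e : List String) (x : String) (xs : List String) :
    pvRun t e (x :: xs)
      = (if pvMatchLn t x then
          some (x :: (xs.takeWhile (fun y => !pvIsHeaderLn y) ++ e ++ xs.dropWhile (fun y => !pvIsHeaderLn y)))
        else (pvRun t e xs).map (x :: ·)) := rfl

theorem pvAFindStart_cons (i : Int) (raw : String) (rest : List (Int × String)) (target : String) :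
    pvAFindStart ((i, raw) :: rest) target
      = (if PySem.Str.startswith (PySem.Str.lower (PySem.Str.strip raw)) "[" &&
            PySem.Str.endswith (PySem.Str.lower (PySem.Str.strip raw)) "]" &&
            (PySem.Str.strip (PySem.Str.slice (PySem.Str.lower (PySem.Str.strip raw)) (some 1) (some (-1))) == target)
         then i else pvAFindStart rest target) := rfl

theorem pvAFindEnd_cons (j : Int) (rest : List Int) (lines : List String) (endv : Int) :
    pvAFindEnd (j :: rest) lines endv
      = (if PySem.Str.startswith (PySem.Str.strip ((PySem.List.pyGet? lines j).getD "")) "[" &&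
            PySem.Str.endswith (PySem.Str.strip ((PySem.List.pyGet? lines j).getD "")) "]"
         then j else pvAFindEnd rest lines endv) := rfl

theorem pvBStep_header (bs : List (List String)) (raw : String) (h : pvIsHeaderLn raw = true) :
    pvBStep bs raw = bs ++ [[raw]] := by
  unfold pvBStep; rw [h]; rfl

theorem pvBStep_body (bs : List (List String)) (raw : String) (h : pvIsHeaderLn raw = false) :
    pvBStep bs raw = bs.dropLast ++ [(bs.getLast?.getD []) ++ [raw]] := by
  unfold pvBStep; rw [h]; rfl

theorem pvEStep_true (t : String) (e : List String) (out : List String) (b : List String) :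
    pvEStep t e (out, true) b = (out ++ b, true) := by
  unfold pvEStep; rfl

theorem pvEStep_false (t : String) (e : List String) (out : List String) (b : List String) :
    pvEStep t e (out, false) b
      = (if pvBMatch t b then (out ++ b ++ e, true) else (out ++ b, false)) := by
  unfold pvEStep
  by_cases hm : pvBMatch t b <;> simp [hm]

-- ---------- A-side characterisation ----------

theorem pvAFindStart_eq (target : String) (xs : List String) : ∀ (a : Int),
    pvAFindStart (PySem.List.enumerate xs a) target
      = match xs.findIdx? (pvMatchLn target) with
        | some k => a + k
        | none => -1 := by
  induction xs with
  | nil => intro a; rfl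
  | cons x rest ih =>
    intro a
    rw [PySem.List.enumerate_cons, List.findIdx?_cons, pvAFindStart_cons, pvACond_eq x target]
    by_cases hm : pvMatchLn target x
    · simp [hm]
    · simp only [hm, Bool.false_eq_true, if_false, ih (a + 1)]
      cases hf : rest.findIdx? (pvMatchLn target) with
      | none => simp
      | some k => simp; ring

theorem pvAFindEnd_eq (suffix : List String) : ∀ (a : Nat) (full : List String),
    full.drop a = suffix → a ≤ full.length →
    pvAFindEnd (PySem.List.pyRange (a : Int) (full.length : Int) 1) full (full.length : Int)
      = (((a + (suffix.takeWhile (fun y => !pvIsHeaderLn y)).length : Nat)) : Int) := by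
  induction suffix with
  | nil =>
    intro a full hdrop hle
    have hlen : full.length ≤ a := List.drop_eq_nil_iff.mp hdrop
    rw [PySem.List.pyRange_one_eq_nil (by exact_mod_cast hlen)]
    show (full.length : Int) = _
    simp only [List.takeWhile_nil, List.length_nil, Nat.add_zero]
    omega
  | cons x xs ih =>
    intro a full hdrop hle
    have ha : a < full.length := by
      by_contra h
      rw [List.drop_eq_nil_of_le (by omega)] at hdrop
      exact List.cons_ne_nil x xs hdrop.symm
    have hx : full[a]? = some x := by
      have h0 : (full.drop a)[0]? = some x := by rw [hdrop]; rfl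
      rw [List.getElem?_drop] at h0
      simpa using h0
    have hdrop' : full.drop (a + 1) = xs := by
      have h1 := congrArg (List.drop 1) hdrop
      rw [List.drop_drop] at h1
      simpa [Nat.add_comm] using h1
    rw [PySem.List.pyRange_one_cons (by exact_mod_cast ha), pvAFindEnd_cons]
    simp only [PySem.List.pyGet?_natCast, hx, Option.getD_some]
    have hcond : (PySem.Str.startswith (PySem.Str.strip x) "[" && PySem.Str.endswith (PySem.Str.strip x) "]")
        = pvIsHeaderLn x := rfl
    rw [hcond, List.takeWhile_cons]
    by_cases hh : pvIsHeaderLn x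
    · simp [hh]
    · simp only [hh, Bool.false_eq_true, if_false, Bool.not_false, if_true]
      have := ih (a + 1) full hdrop' (by omega)
      rw [show ((a : Int) + 1) = ((a + 1 : Nat) : Int) by push_cast; ring, this]
      simp only [List.length_cons]
      push_cast
      omega

-- pvRun in findIdx? form
theorem pvRun_eq_findIdx? (target : String) (entries : List String) (xs : List String) :
    pvRun target entries xs
      = (xs.findIdx? (pvMatchLn target)).map (fun k =>
          xs.take (k + 1) ++ ((xs.drop (k + 1)).takeWhile (fun y => !pvIsHeaderLn y)
            ++ entries ++ (xs.drop (k + 1)).dropWhile (fun y => !pvIsHeaderLn y))) := by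
  induction xs with
  | nil => rfl
  | cons x rest ih =>
    rw [List.findIdx?_cons, pvRun_cons]
    by_cases hm : pvMatchLn target x
    · simp [hm]
    · simp only [hm, Bool.false_eq_true, if_false, ih]
      cases hf : rest.findIdx? (pvMatchLn target) with
      | none => simp
      | some k => simp

-- ---------- B-side characterisation ----------

-- the tail blocks of the split, as a structural recursion
def pvSBrest : List String → List (List String)
  | [] => []
  | h :: rest =>
      (h :: rest.takeWhile (fun y => !pvIsHeaderLn y))
        :: pvSBrest (rest.dropWhile (fun y => !pvIsHeaderLn y))
  termination_by l => l.length
  decreasing_by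
    have := List.length_dropWhile_le (fun y => !pvIsHeaderLn y) rest
    simp only [List.length_cons]
    omega

theorem pvSBrest_nil : pvSBrest [] = [] := by rw [pvSBrest]

theorem pvSBrest_cons (h : String) (rest : List String) :
    pvSBrest (h :: rest)
      = (h :: rest.takeWhile (fun y => !pvIsHeaderLn y))
        :: pvSBrest (rest.dropWhile (fun y => !pvIsHeaderLn y)) := by
  rw [pvSBrest]

theorem pvBStep_foldl (xs : List String) : ∀ (bs : List (List String)) (c : List String),
    List.foldl pvBStep (bs ++ [c]) xs = bs ++ List.foldl pvBStep [c] xs := by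
  induction xs with
  | nil => intro bs c; rfl
  | cons x rest ih =>
    intro bs c
    rw [List.foldl_cons, List.foldl_cons]
    by_cases hh : pvIsHeaderLn x
    · rw [pvBStep_header _ _ hh, pvBStep_header _ _ hh,
        ih (bs ++ [c]) [x], ih [c] [x], List.append_assoc]
    · rw [pvBStep_body _ _ (Bool.eq_false_iff.mpr hh), pvBStep_body _ _ (Bool.eq_false_iff.mpr hh)]
      simp only [List.dropLast_concat, List.getLast?_concat, Option.getD_some,
        List.dropLast_singleton, List.getLast?_singleton, List.nil_append]
      exact ih bs (c ++ [x])

theorem pvSplitBlocks_char (lines : List String) : ∀ (c : List String),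
    List.foldl pvBStep [c] lines
      = (c ++ lines.takeWhile (fun y => !pvIsHeaderLn y))
        :: pvSBrest (lines.dropWhile (fun y => !pvIsHeaderLn y)) := by
  induction lines with
  | nil => intro c; simp [pvSBrest_nil]
  | cons x rest ih =>
    intro c
    rw [List.foldl_cons, List.takeWhile_cons, List.dropWhile_cons]
    by_cases hh : pvIsHeaderLn x
    · rw [pvBStep_header _ _ hh, pvBStep_foldl rest [c] [x], ih [x]]
      simp only [hh, Bool.not_true, Bool.false_eq_true, if_false]
      rw [pvSBrest_cons]
      simp
    · rw [pvBStep_body _ _ (Bool.eq_false_iff.mpr hh)]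
      simp only [List.dropLast_singleton, List.getLast?_singleton, Option.getD_some, List.nil_append]
      rw [ih (c ++ [x])]
      simp only [hh, Bool.not_false, if_true]
      simp

theorem pvSBrest_flatten (ls : List String) : (pvSBrest ls).flatten = ls := by
  induction ls using pvSBrest.induct with
  | case1 => rw [pvSBrest_nil]; rfl
  | case2 h rest ih =>
    rw [pvSBrest_cons, List.flatten_cons, ih]
    simp [List.takeWhile_append_dropWhile]

theorem pvEStep_foldl_true (t : String) (e : List String) (bs : List (List String)) :
    ∀ (out : List String), List.foldl (pvEStep t e) (out, true) bs = (out ++ bs.flatten, true) := by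
  induction bs with
  | nil => intro out; simp
  | cons b rest ih =>
    intro out
    rw [List.foldl_cons, pvEStep_true, ih (out ++ b)]
    simp

-- the emission loop as a structural recursion over the block list
def pvEmitRec (t : String) (e : List String) : List (List String) → List String × Bool
  | [] => ([], false)
  | b :: bs =>
    if pvBMatch t b then (b ++ e ++ bs.flatten, true)
    else (b ++ (pvEmitRec t e bs).1, (pvEmitRec t e bs).2)

theorem pvEStep_foldl_false (t : String) (e : List String) (bs : List (List String)) :
    ∀ (out : List String),
    List.foldl (pvEStep t e) (out, false) bs
      = (out ++ (pvEmitRec t e bs).1, (pvEmitRec t e bs).2) := by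
  induction bs with
  | nil => intro out; simp [pvEmitRec]
  | cons b rest ih =>
    intro out
    rw [List.foldl_cons, pvEStep_false]
    show _ = (out ++ (pvEmitRec t e (b :: rest)).1, (pvEmitRec t e (b :: rest)).2)
    rw [show pvEmitRec t e (b :: rest)
          = (if pvBMatch t b then (b ++ e ++ rest.flatten, true)
            else (b ++ (pvEmitRec t e rest).1, (pvEmitRec t e rest).2)) from rfl]
    by_cases hm : pvBMatch t b
    · simp only [hm, if_true]
      rw [pvEStep_foldl_true]
      simp
    · simp only [hm, Bool.false_eq_true, if_false]
      rw [ih (out ++ b)]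
      simp

-- pvRun over a header-free prefix
theorem pvRun_nh_prefix (t : String) (e : List String) (P : List String)
    (hP : ∀ x ∈ P, pvIsHeaderLn x = false) : ∀ (rest : List String),
    pvRun t e (P ++ rest) = (pvRun t e rest).map (P ++ ·) := by
  induction P with
  | nil =>
    intro rest
    simp only [List.nil_append]
    cases pvRun t e rest <;> simp
  | cons x P' ih =>
    intro rest
    have hx : pvIsHeaderLn x = false := hP x List.mem_cons_self
    have hm : pvMatchLn t x = false := by unfold pvMatchLn; rw [hx]; rfl
    rw [List.cons_append, pvRun_cons, hm]
    simp only [Bool.false_eq_true, if_false]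
    rw [ih (fun y hy => hP y (List.mem_cons_of_mem _ hy)) rest]
    cases pvRun t e rest <;> simp

-- B's matching test on a block headed by h is the common predicate at h
theorem pvBMatch_cons (t : String) (h : String) (tl : List String) :
    pvBMatch t (h :: tl) = pvMatchLn t h := by
  unfold pvBMatch pvMatchLn
  simp

-- the emission recursion over the split of a suffix computes pvRun
theorem pvEmitRec_pvSBrest (t : String) (e : List String) (ls : List String) :
    pvEmitRec t e (pvSBrest ls)
      = match pvRun t e ls with
        | some r => (r, true)
        | none => (ls, false) := by
  induction ls using pvSBrest.induct with
  | case1 => rw [pvSBrest_nil]; rfl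
  | case2 h rest ih =>
    rw [pvSBrest_cons]
    rw [show pvEmitRec t e ((h :: rest.takeWhile (fun y => !pvIsHeaderLn y)) :: pvSBrest (rest.dropWhile (fun y => !pvIsHeaderLn y)))
          = (if pvBMatch t (h :: rest.takeWhile (fun y => !pvIsHeaderLn y)) then
              ((h :: rest.takeWhile (fun y => !pvIsHeaderLn y)) ++ e ++ (pvSBrest (rest.dropWhile (fun y => !pvIsHeaderLn y))).flatten, true)
            else ((h :: rest.takeWhile (fun y => !pvIsHeaderLn y)) ++ (pvEmitRec t e (pvSBrest (rest.dropWhile (fun y => !pvIsHeaderLn y)))).1,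
                  (pvEmitRec t e (pvSBrest (rest.dropWhile (fun y => !pvIsHeaderLn y)))).2)) from rfl]
    rw [pvBMatch_cons, pvRun_cons]
    by_cases hm : pvMatchLn t h
    · simp only [hm, if_true]
      rw [pvSBrest_flatten]
      simp
    · simp only [hm, Bool.false_eq_true, if_false, ih]
      have hrest : pvRun t e rest
          = (pvRun t e (rest.dropWhile (fun y => !pvIsHeaderLn y))).map
              (rest.takeWhile (fun y => !pvIsHeaderLn y) ++ ·) := by
        conv_lhs => rw [← List.takeWhile_append_dropWhile
          (p := fun y => !pvIsHeaderLn y) (l := rest)]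
        exact pvRun_nh_prefix t e _ (fun x hx => by
          have := List.mem_takeWhile_imp hx
          simpa using this) _
      rw [hrest]
      cases pvRun t e (rest.dropWhile (fun y => !pvIsHeaderLn y)) with
      | none => simp [List.takeWhile_append_dropWhile]
      | some r' => simp

-- the whole of B's two loops compute pvRun
theorem pvB_loops (t : String) (e : List String) (lines : List String) :
    List.foldl (pvEStep t e) ([], false) (pvSplitBlocks lines)
      = match pvRun t e lines with
        | some r => (r, true)
        | none => (lines, false) := by
  unfold pvSplitBlocks
  rw [show ([[]] : List (List String)) = [([] : List String)] from rfl, pvSplitBlocks_char]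
  set P := lines.takeWhile (fun y => !pvIsHeaderLn y) with hPdef
  have hPnh : ∀ x ∈ P, pvIsHeaderLn x = false := fun x hx => by
    have := List.mem_takeWhile_imp hx
    simpa using this
  have hfirst : pvBMatch t ([] ++ P) = false := by
    rw [List.nil_append]
    cases hP : P with
    | nil => rfl
    | cons h tl =>
      rw [pvBMatch_cons]
      have : pvIsHeaderLn h = false := hPnh h (by rw [hP]; exact List.mem_cons_self)
      unfold pvMatchLn
      rw [this]
      rfl
  rw [List.foldl_cons, pvEStep_false, hfirst]
  simp only [Bool.false_eq_true, if_false]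
  rw [pvEStep_foldl_false, pvEmitRec_pvSBrest]
  have hrun : pvRun t e lines
      = (pvRun t e (lines.dropWhile (fun y => !pvIsHeaderLn y))).map (P ++ ·) := by
    conv_lhs => rw [← List.takeWhile_append_dropWhile (p := fun y => !pvIsHeaderLn y) (l := lines)]
    exact pvRun_nh_prefix t e _ hPnh _
  rw [hrun]
  cases pvRun t e (lines.dropWhile (fun y => !pvIsHeaderLn y)) with
  | none => simp [hPdef, List.takeWhile_append_dropWhile]
  | some r' => simp

-- ===== VERDICT (by name: the statement is the Claim_ definition above) =====
theorem append_itp_entries_py_spec : Claim_equal_append_itp_entries_py := by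
  intro lines section_ entries _
  unfold Spec_append_itp_entries_py append_itp_entries_py append_itp_entries_py_alt
  by_cases he : entries.isEmpty
  · simp only [he, if_true]
  · simp only [he, Bool.false_eq_true, if_false]
    set t := PySem.Str.lower section_ with ht
    rw [pvB_loops t entries lines, pvRun_eq_findIdx? t entries lines,
      pvAFindStart_eq t lines 0]
    cases hf : lines.findIdx? (pvMatchLn t) with
    | none =>
      simp
    | some k =>
      obtain ⟨hk, _, _⟩ := List.findIdx?_eq_some_iff_getElem.mp hf
      simp only [Option.map_some]
      have hnneg : ¬ ((0 : Int) + (k : Nat) < 0) := by omega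
      rw [if_neg hnneg]
      rw [show ((0 : Int) + (k : Nat) + 1) = ((k + 1 : Nat) : Int) by push_cast; ring]
      rw [pvAFindEnd_eq (lines.drop (k + 1)) (k + 1) lines rfl (by omega)]
      rw [PySem.List.slice_to_natCast, PySem.List.slice_from_natCast]
      set tw := (lines.drop (k + 1)).takeWhile (fun y => !pvIsHeaderLn y) with htw
      set dw := (lines.drop (k + 1)).dropWhile (fun y => !pvIsHeaderLn y) with hdw
      have htake : lines.take (k + 1 + tw.length) = lines.take (k + 1) ++ tw := by
        rw [List.take_add]
        congr 1
        conv_lhs => rw [← List.takeWhile_append_dropWhile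
          (p := fun y => !pvIsHeaderLn y) (l := lines.drop (k + 1))]
        rw [← htw, ← hdw, List.take_left]
      have hdrop : lines.drop (k + 1 + tw.length) = dw := by
        rw [← List.drop_drop]
        conv_lhs => rw [← List.takeWhile_append_dropWhile
          (p := fun y => !pvIsHeaderLn y) (l := lines.drop (k + 1))]
        rw [← htw, ← hdw, List.drop_left]
      rw [htake, hdrop]
      simp
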